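-- pv_equiv track=rewrite | github.com/NikolajKrogh/P6 | DataClassification/nearest_centroid.py | format_final_centroid_to_java
-- ===== SOURCE A (Python) =====
-- def format_final_centroid_to_java(centroids):
--     result = "{"
--     for centroid in centroids:
--         result += "new Centroid("
--         for i in range(len(centroid)):
--             if i == 2:
--                 result += "(byte) "
--             result += str(centroid[i])
--             result += ", "
--         result = result.rstrip(", ")#removes trailing comma
--         result += "),"
--
--     result = result.rstrip(", ") #removes trailing comma
--     result += "};"
--     return result
-- ===== SOURCE B (Python) =====
-- def format_final_centroid_to_java(centroids):
--     def fmt_vals(centroid, i):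
--         if i >= len(centroid):
--             return ""
--         s = (("(byte) " if i == 2 else "") + str(centroid[i])
--              + (", " if i + 1 < len(centroid) else ""))
--         return s + fmt_vals(centroid, i + 1)
--
--     def fmt_cents(rest, first):
--         if not rest:
--             return ""
--         sep = "" if first else ","
--         return sep + "new Centroid(" + fmt_vals(rest[0], 0) + ")" + fmt_cents(rest[1:], False)
--
--     return "{" + fmt_cents(centroids, True) + "};"
-- ===== Notes on version B (the rewrite author's own statement) =====
-- stated objective: alternative
-- what changed: Replaces A's iterative append-a-trailing-separator-then-rstrip pattern with structural recursion that decides each separator up front (by lookahead for elements, by a first-flag for centroids), so no cleanup pass ever runs.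
import Mathlib
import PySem

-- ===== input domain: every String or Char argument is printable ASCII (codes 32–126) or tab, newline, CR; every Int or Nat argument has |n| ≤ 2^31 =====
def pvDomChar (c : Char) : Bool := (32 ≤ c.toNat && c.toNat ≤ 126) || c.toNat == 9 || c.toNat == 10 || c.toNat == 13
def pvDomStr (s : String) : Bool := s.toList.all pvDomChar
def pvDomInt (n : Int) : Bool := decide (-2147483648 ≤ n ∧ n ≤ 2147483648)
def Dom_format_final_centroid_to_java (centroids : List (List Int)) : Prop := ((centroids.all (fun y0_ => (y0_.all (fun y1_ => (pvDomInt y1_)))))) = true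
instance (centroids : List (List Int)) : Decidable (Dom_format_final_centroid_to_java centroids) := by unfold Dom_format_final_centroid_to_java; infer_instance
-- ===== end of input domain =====

-- B formats by structural recursion, deciding each separator up front (lookahead / first-flag)
-- instead of A's append-trailing-separator-then-rstrip loop; same output, a different decomposition.

-- ===== PORT A =====
-- exact hand port of Python's s.rstrip(", "): drop ',' and ' ' from the right
def pvStripP (c : Char) : Bool := c == ',' || c == ' '
def pvRstripCS (s : String) : String :=
  String.ofList ((s.toList.reverse.dropWhile pvStripP).reverse)

def format_final_centroid_to_java (centroids : List (List Int)) : String :=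
  let result := centroids.foldl (fun result centroid =>
    let result := result ++ "new Centroid("
    let result := (PySem.List.pyRange 0 centroid.length 1).foldl (fun result i =>
      let result := if i == 2 then result ++ "(byte) " else result
      let result := result ++ PySem.Int.toStr (PySem.List.pyGetD centroid i 0)
      result ++ ", ") result
    let result := pvRstripCS result
    result ++ "),") "{"
  let result := pvRstripCS result
  result ++ "};"

-- ===== PORT B =====
def pvFmtVals (centroid : List Int) (i : Nat) : String :=
  if h : i < centroid.length then
    ((if i == 2 then "(byte) " else "") ++ PySem.Int.toStr (centroid[i])
      ++ (if i + 1 < centroid.length then ", " else "")) ++ pvFmtVals centroid (i + 1)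
  else ""
termination_by centroid.length - i

def pvFmtCents : List (List Int) → Bool → String
  | [], _ => ""
  | c :: rest, first =>
    (if first then "" else ",") ++ "new Centroid(" ++ pvFmtVals c 0 ++ ")" ++ pvFmtCents rest false

def format_final_centroid_to_java_alt (centroids : List (List Int)) : String :=
  "{" ++ pvFmtCents centroids true ++ "};"

-- ===== PRECONDITION & SPEC =====
def Spec_format_final_centroid_to_java (centroids : List (List Int)) (out : String) : Prop := out = format_final_centroid_to_java_alt centroids
instance (centroids : List (List Int)) (out : String) : Decidable (Spec_format_final_centroid_to_java centroids out) := by unfold Spec_format_final_centroid_to_java; infer_instance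

-- ===== CLAIM (what is proved, stated in full; the proofs are below) =====
def Claim_equal_format_final_centroid_to_java : Prop := ∀ (centroids : List (List Int)), Dom_format_final_centroid_to_java centroids → Spec_format_final_centroid_to_java centroids (format_final_centroid_to_java centroids)

-- ===== LEMMAS AND PROOFS =====

-- proof-side view of the per-centroid pieces, at the List Char level
def pvPartsL (c : List Int) : List (List Char) :=
  (PySem.List.enumerate c).map (fun p =>
    if p.1 == 2 then "(byte) ".toList ++ PySem.Int.toChars p.2 else PySem.Int.toChars p.2)

def pvItemL (c : List Int) : List Char :=
  "new Centroid(".toList ++ PySem.Chars.join [',', ' '] (pvPartsL c) ++ [')']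

def pvRstripL (l : List Char) : List Char := (l.reverse.dropWhile pvStripP).reverse

lemma pvRstripCS_toList (s : String) : (pvRstripCS s).toList = pvRstripL s.toList := by
  simp [pvRstripCS, pvRstripL]

lemma pvRstripL_append_strip (s t : List Char) (h : ∀ c ∈ t, pvStripP c = true) :
    pvRstripL (s ++ t) = pvRstripL s := by
  unfold pvRstripL
  rw [List.reverse_append, List.dropWhile_append]
  have ht : List.dropWhile pvStripP t.reverse = [] := by
    rw [List.dropWhile_eq_nil_iff]
    intro c hc; exact h c (List.mem_reverse.mp hc)
  simp [ht]

lemma pvRstripL_of_last (s : List Char) (ch : Char)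
    (h : s.getLast? = some ch) (hch : pvStripP ch = false) : pvRstripL s = s := by
  unfold pvRstripL
  rw [List.getLast?_eq_head?_reverse] at h
  cases hrev : s.reverse with
  | nil => rw [List.reverse_eq_nil_iff] at hrev; simp [hrev]
  | cons a l =>
    rw [hrev] at h
    simp at h
    subst h
    rw [List.dropWhile_cons_of_neg (by simp [hch]), ← hrev, List.reverse_reverse]

lemma pvDigitChar_isDigit (m : Nat) (h : m < 10) : (Nat.digitChar m).isDigit = true := by
  interval_cases m <;> decide

lemma pvToDigitsCore_mem : ∀ (fuel n : Nat) (ds : List Char) (c : Char),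
    c ∈ Nat.toDigitsCore 10 fuel n ds → c ∈ ds ∨ c.isDigit = true := by
  intro fuel
  induction fuel with
  | zero => intro n ds c hc; exact Or.inl hc
  | succ fuel ih =>
    intro n ds c hc
    rw [Nat.toDigitsCore] at hc
    by_cases h10 : n / 10 = 0
    · simp only [h10] at hc
      rcases List.mem_cons.mp hc with h | h
      · exact Or.inr (h ▸ pvDigitChar_isDigit _ (Nat.mod_lt _ (by norm_num)))
      · exact Or.inl h
    · simp only [if_neg h10] at hc
      rcases ih (n / 10) _ c hc with h | h
      · rcases List.mem_cons.mp h with h | h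
        · exact Or.inr (h ▸ pvDigitChar_isDigit _ (Nat.mod_lt _ (by norm_num)))
        · exact Or.inl h
      · exact Or.inr h

lemma pvToDigitsCore_ne_nil : ∀ (fuel n : Nat) (ds : List Char), ds ≠ [] →
    Nat.toDigitsCore 10 fuel n ds ≠ [] := by
  intro fuel
  induction fuel with
  | zero => intro n ds h; simpa [Nat.toDigitsCore] using h
  | succ fuel ih =>
    intro n ds _
    rw [Nat.toDigitsCore]
    by_cases h10 : n / 10 = 0
    · simp [h10]
    · simp only [if_neg h10]
      exact ih (n / 10) _ (by simp)

lemma pvToDigits_ne_nil (n : Nat) : Nat.toDigits 10 n ≠ [] := by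
  rw [Nat.toDigits, Nat.toDigitsCore]
  by_cases h10 : n / 10 = 0
  · simp [h10]
  · simp only [if_neg h10]
    exact pvToDigitsCore_ne_nil _ _ _ (by simp)

lemma pvToDigits_mem (n : Nat) (c : Char) (h : c ∈ Nat.toDigits 10 n) : c.isDigit = true := by
  rcases pvToDigitsCore_mem _ _ _ _ h with h | h
  · simp at h
  · exact h

lemma pvIsDigit_not_strip (c : Char) (h : c.isDigit = true) : pvStripP c = false := by
  by_contra hc
  rw [Bool.not_eq_false, pvStripP, Bool.or_eq_true] at hc
  rcases hc with hc | hc <;> rw [beq_iff_eq] at hc <;> subst hc <;> simp at h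

lemma pvToChars_last (n : Int) :
    ∃ ch, (PySem.Int.toChars n).getLast? = some ch ∧ pvStripP ch = false := by
  have key : ∀ m : Nat, ∃ ch, (Nat.toDigits 10 m).getLast? = some ch ∧ pvStripP ch = false := by
    intro m
    rcases List.getLast?_eq_some_iff.mpr ⟨_, (List.dropLast_append_getLast (pvToDigits_ne_nil m)).symm⟩ with h
    refine ⟨(Nat.toDigits 10 m).getLast (pvToDigits_ne_nil m), h, ?_⟩
    exact pvIsDigit_not_strip _ (pvToDigits_mem m _ (List.getLast_mem _))
  rw [PySem.Int.toChars]
  by_cases hn : n < 0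
  · rcases key n.natAbs with ⟨ch, h1, h2⟩
    rcases List.exists_cons_of_ne_nil (pvToDigits_ne_nil n.natAbs) with ⟨a, l, hl⟩
    refine ⟨ch, ?_, h2⟩
    rw [if_pos hn, hl, List.getLast?_cons_cons, ← hl, h1]
  · simpa [hn] using key n.toNat

lemma pvPartsL_last (c : List Int) (q : List Char) (hq : q ∈ pvPartsL c) :
    ∃ ch, q.getLast? = some ch ∧ pvStripP ch = false := by
  rw [pvPartsL, List.mem_map] at hq
  rcases hq with ⟨p, _, hp⟩
  rcases pvToChars_last p.2 with ⟨ch, h1, h2⟩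
  refine ⟨ch, ?_, h2⟩
  subst hp
  split
  · rw [List.getLast?_append, h1]; rfl
  · exact h1

lemma pvFlatten_join (sep : List Char) : ∀ (parts : List (List Char)),
    (parts.map (· ++ sep)).flatten
      = PySem.Chars.join sep parts ++ (if parts = [] then [] else sep) := by
  intro parts
  induction parts with
  | nil => simp [PySem.Chars.join_nil]
  | cons p ps ih =>
    cases ps with
    | nil => simp [PySem.Chars.join_singleton]
    | cons q qs =>
      rw [List.map_cons, List.flatten_cons, ih, PySem.Chars.join_cons_cons]
      simp

lemma pvJoin_last (sep : List Char) : ∀ (parts : List (List Char)), parts ≠ [] →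
    (∀ q ∈ parts, ∃ ch, q.getLast? = some ch ∧ pvStripP ch = false) →
    ∃ ch, (PySem.Chars.join sep parts).getLast? = some ch ∧ pvStripP ch = false := by
  intro parts
  induction parts with
  | nil => intro h; exact absurd rfl h
  | cons p ps ih =>
    intro _ hall
    cases ps with
    | nil => simpa [PySem.Chars.join_singleton] using hall p (by simp)
    | cons q qs =>
      rcases ih (by simp) (fun r hr => hall r (List.mem_cons_of_mem _ hr)) with ⟨ch, h1, h2⟩
      refine ⟨ch, ?_, h2⟩
      rw [PySem.Chars.join_cons_cons, List.getLast?_append, List.getLast?_append, h1]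
      rfl

lemma pvSepStrip : ∀ c ∈ [',', ' '], pvStripP c = true := by
  intro c hc; fin_cases hc <;> rfl

lemma pvSepStrip1 : ∀ c ∈ [','], pvStripP c = true := by
  intro c hc; fin_cases hc ; rfl

lemma pvKey (pre : List Char) (parts : List (List Char)) (sep : List Char)
    (hsep : ∀ c ∈ sep, pvStripP c = true)
    (hparts : ∀ q ∈ parts, ∃ ch, q.getLast? = some ch ∧ pvStripP ch = false)
    (hpre : ∃ ch, pre.getLast? = some ch ∧ pvStripP ch = false) :
    pvRstripL (pre ++ (parts.map (· ++ sep)).flatten) = pre ++ PySem.Chars.join sep parts := by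
  rw [pvFlatten_join]
  by_cases hp : parts = []
  · subst hp
    rcases hpre with ⟨ch, h1, h2⟩
    simpa using pvRstripL_of_last _ _ h1 h2
  · rw [if_neg hp, ← List.append_assoc, pvRstripL_append_strip _ _ hsep]
    rcases pvJoin_last sep parts hp hparts with ⟨ch, h1, h2⟩
    apply pvRstripL_of_last _ ch _ h2
    rw [List.getLast?_append, h1]
    rfl

-- the inner Python loop only appends: characterisation of its result
lemma pvInnerFoldGeneric : ∀ (l : List (Int × Int)) (acc : String),
    (l.foldl (fun result p =>
        (let result := if p.1 == 2 then result ++ "(byte) " else result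
         result ++ PySem.Int.toStr p.2) ++ ", ") acc).toList
      = acc.toList ++ ((l.map (fun p =>
          if p.1 == 2 then "(byte) ".toList ++ PySem.Int.toChars p.2
          else PySem.Int.toChars p.2)).map (· ++ [',', ' '])).flatten := by
  intro l
  induction l with
  | nil => simp
  | cons p ps ih =>
    intro acc
    rw [List.foldl_cons, ih]
    by_cases h2 : p.1 = 2
    · simp [h2, String.toList_append, PySem.Int.toList_toStr]
    · simp [h2, String.toList_append, PySem.Int.toList_toStr]

lemma pvInnerFold (c : List Int) (acc : String) :
    ((PySem.List.pyRange 0 c.length 1).foldl (fun result i =>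
        let result := if i == 2 then result ++ "(byte) " else result
        let result := result ++ PySem.Int.toStr (PySem.List.pyGetD c i 0)
        result ++ ", ") acc).toList
      = acc.toList ++ ((pvPartsL c).map (· ++ [',', ' '])).flatten := by
  have he := PySem.List.enumerate_eq_map_pyRange c 0
  have hlen : (PySem.List.len c) = (c.length : Int) := by simp [PySem.List.len]
  have hg := pvInnerFoldGeneric (PySem.List.enumerate c) acc
  rw [he, hlen, List.foldl_map] at hg
  rw [pvPartsL, he, hlen]
  exact hg

-- one outer iteration appends exactly one formatted centroid plus a comma
lemma pvOuterStep (acc : String) (c : List Int) :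
    ((fun result centroid =>
        let result := result ++ "new Centroid("
        let result := (PySem.List.pyRange 0 centroid.length 1).foldl (fun result i =>
          let result := if i == 2 then result ++ "(byte) " else result
          let result := result ++ PySem.Int.toStr (PySem.List.pyGetD centroid i 0)
          result ++ ", ") result
        let result := pvRstripCS result
        result ++ "),") acc c).toList
      = acc.toList ++ (pvItemL c ++ [',']) := by
  show (pvRstripCS _ ++ "),").toList = _
  rw [String.toList_append, pvRstripCS_toList, pvInnerFold, String.toList_append]
  rw [List.append_assoc, ← List.append_assoc acc.toList]
  rw [pvKey _ _ _ pvSepStrip (pvPartsL_last c)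
        ⟨'(', by rw [List.getLast?_append]; rfl, rfl⟩]
  rw [pvItemL]
  simp

lemma pvOuterFold : ∀ (centroids : List (List Int)) (acc : String),
    (centroids.foldl (fun result centroid =>
        let result := result ++ "new Centroid("
        let result := (PySem.List.pyRange 0 centroid.length 1).foldl (fun result i =>
          let result := if i == 2 then result ++ "(byte) " else result
          let result := result ++ PySem.Int.toStr (PySem.List.pyGetD centroid i 0)
          result ++ ", ") result
        let result := pvRstripCS result
        result ++ "),") acc).toList
      = acc.toList ++ ((centroids.map pvItemL).map (· ++ [','])).flatten := by
  intro centroids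
  induction centroids with
  | nil => simp
  | cons c cs ih =>
    intro acc
    rw [List.foldl_cons, ih, pvOuterStep]
    simp

lemma pvItemL_last (centroids : List (List Int)) (q : List Char)
    (hq : q ∈ centroids.map pvItemL) : ∃ ch, q.getLast? = some ch ∧ pvStripP ch = false := by
  rw [List.mem_map] at hq
  rcases hq with ⟨c, _, hc⟩
  refine ⟨')', ?_, by decide⟩
  subst hc
  rw [pvItemL, List.append_assoc, List.getLast?_append, List.getLast?_append]
  rfl

-- B-side characterisation: the index-k part of a centroid
def pvPartAt (c : List Int) (k : Nat) : List Char :=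
  if k == 2 then "(byte) ".toList ++ PySem.Int.toChars (PySem.List.pyGetD c (k : Int) 0)
  else PySem.Int.toChars (PySem.List.pyGetD c (k : Int) 0)

lemma pvPartsL_eq (c : List Int) : pvPartsL c = (List.range c.length).map (pvPartAt c) := by
  rw [pvPartsL, PySem.List.enumerate_eq_map_pyRange]
  have hlen : (PySem.List.len c) = (c.length : Int) := by simp [PySem.List.len]
  rw [hlen, PySem.List.pyRange_one, List.map_map, List.map_map]
  simp only [Int.sub_zero, Int.toNat_natCast]
  apply List.map_congr_left
  intro k hk
  simp only [Function.comp_apply, zero_add]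
  unfold pvPartAt
  by_cases h : k = 2
  · subst h; rfl
  · have h1 : ((k : Int) == 2) = false := by
      simp only [beq_eq_false_iff_ne, ne_eq]
      exact_mod_cast h
    have h2 : (k == 2) = false := by simpa using h
    rw [h1, h2]

lemma pvFmtVals_toList (xs : List Int) : ∀ (n i : Nat), n = xs.length - i →
    (pvFmtVals xs i).toList
      = PySem.Chars.join [',', ' '] ((List.range' i n).map (pvPartAt xs)) := by
  intro n
  induction n with
  | zero =>
    intro i hi
    rw [pvFmtVals, dif_neg (by omega)]
    simp [PySem.Chars.join_nil]
  | succ m ih =>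
    intro i hi
    have hlt : i < xs.length := by omega
    rw [pvFmtVals, dif_pos hlt, List.range'_succ, List.map_cons]
    have hget : PySem.List.pyGetD xs ((i : Int)) 0 = xs[i] := by
      rw [PySem.List.pyGetD_natCast, List.getD_eq_getElem?_getD, List.getElem?_eq_getElem hlt]
      rfl
    have hpart : ((if i == 2 then "(byte) " else "") ++ PySem.Int.toStr (xs[i]'hlt)).toList
        = pvPartAt xs i := by
      by_cases h : i = 2
      · subst h
        simp only [pvPartAt]
        rw [hget]
        simp [String.toList_append, PySem.Int.toList_toStr]
      · have hb : (i == 2) = false := by simpa using h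
        simp [pvPartAt, hb, PySem.Int.toList_toStr, hget]
    by_cases hnext : i + 1 < xs.length
    · have hm : m = xs.length - (i + 1) := by omega
      obtain ⟨m', hm'⟩ : ∃ m', m = m' + 1 := ⟨m - 1, by omega⟩
      rw [if_pos hnext, hm', List.range'_succ, List.map_cons, PySem.Chars.join_cons_cons]
      rw [← List.map_cons, ← List.range'_succ, ← hm']
      simp only [String.toList_append, ih (i + 1) hm, ← hpart]
      simp
    · have hm : m = 0 := by omega
      have hend : (pvFmtVals xs (i + 1)).toList = [] := by
        rw [pvFmtVals, dif_neg (by omega)]; rfl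
      rw [if_neg hnext, hm]
      simp [String.toList_append, hend, PySem.Chars.join_singleton, ← hpart]

lemma pvItem_toList (c : List Int) :
    ("new Centroid(" ++ pvFmtVals c 0 ++ ")").toList = pvItemL c := by
  rw [pvItemL, pvPartsL_eq]
  have h0 := pvFmtVals_toList c c.length 0 (by omega)
  rw [← List.range_eq_range'] at h0
  simp [String.toList_append, h0]

lemma pvFmtCents_false : ∀ (cs : List (List Int)),
    (pvFmtCents cs false).toList = (cs.map (fun c => [','] ++ pvItemL c)).flatten := by
  intro cs
  induction cs with
  | nil => rfl
  | cons c rest ih =>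
    show ("," ++ "new Centroid(" ++ pvFmtVals c 0 ++ ")" ++ pvFmtCents rest false).toList = _
    have h1 := pvItem_toList c
    simp only [String.toList_append, List.map_cons, List.flatten_cons] at h1 ⊢
    rw [ih, ← h1]
    simp

lemma pvJoinComma : ∀ (ps : List (List Char)) (p : List Char),
    PySem.Chars.join [','] (p :: ps) = p ++ (ps.map (fun q => [','] ++ q)).flatten := by
  intro ps
  induction ps with
  | nil => intro p; simp [PySem.Chars.join_singleton]
  | cons q qs ih =>
    intro p
    rw [PySem.Chars.join_cons_cons, ih q]
    simp

lemma pvFmtCents_true (cs : List (List Int)) :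
    (pvFmtCents cs true).toList = PySem.Chars.join [','] (cs.map pvItemL) := by
  cases cs with
  | nil => rfl
  | cons c rest =>
    show ("" ++ "new Centroid(" ++ pvFmtVals c 0 ++ ")" ++ pvFmtCents rest false).toList = _
    have h1 := pvItem_toList c
    simp only [String.toList_append] at h1 ⊢
    rw [pvFmtCents_false, List.map_cons, pvJoinComma, ← h1]
    simp [Function.comp_def]

lemma pvAltToList (centroids : List (List Int)) :
    (format_final_centroid_to_java_alt centroids).toList
      = "{".toList ++ PySem.Chars.join [','] (centroids.map pvItemL) ++ "};".toList := by
  rw [format_final_centroid_to_java_alt]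
  simp [String.toList_append, pvFmtCents_true]

-- ===== VERDICT (by name: the statement is the Claim_ definition above) =====
theorem format_final_centroid_to_java_spec : Claim_equal_format_final_centroid_to_java := by
  intro centroids _
  show format_final_centroid_to_java centroids = format_final_centroid_to_java_alt centroids
  apply String.ext_iff.mpr
  rw [format_final_centroid_to_java]
  show (pvRstripCS _ ++ "};").toList = _
  rw [String.toList_append, pvRstripCS_toList, pvOuterFold, pvAltToList]
  rw [pvKey _ _ _ pvSepStrip1 (pvItemL_last centroids) ⟨'{', rfl, rfl⟩]
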